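-- pv_equiv track=rewrite | github.com/alis-khadka/llm_program_grader | dataset/solutions/21_22-1-1-python/4IIMNJUZ.py | calc
-- ===== SOURCE A (Python) =====
-- def calc(n):
--     res = 1
--     bs = 2
--     while(n > 0):
--         if ((n % 2) == 1):
--             res =  (res * bs)  % 1000000007
--         bs = (bs * bs) % 1000000007
--         n = n //2
--     return (res-1) % 1000000007
-- ===== SOURCE B (Python) =====
-- MOD = 1000000007
--
-- def _pow2(n):
--     # 2^n mod MOD by recursive halving (n <= 0 -> 1)
--     if n <= 0:
--         return 1
--     h = _pow2(n // 2)
--     h = (h * h) % MOD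
--     if n % 2 == 1:
--         h = (h * 2) % MOD
--     return h
--
-- def calc(n):
--     return (_pow2(n) - 1) % MOD
-- ===== Notes on version B (the rewrite author's own statement) =====
-- stated objective: alternative
-- what changed: Replaced the iterative square-and-multiply loop carrying a running result and squared base with a recursive divide-and-conquer helper computing 2^n mod 1e9+7 by halving n and squaring the recursive result.
import Mathlib
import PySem

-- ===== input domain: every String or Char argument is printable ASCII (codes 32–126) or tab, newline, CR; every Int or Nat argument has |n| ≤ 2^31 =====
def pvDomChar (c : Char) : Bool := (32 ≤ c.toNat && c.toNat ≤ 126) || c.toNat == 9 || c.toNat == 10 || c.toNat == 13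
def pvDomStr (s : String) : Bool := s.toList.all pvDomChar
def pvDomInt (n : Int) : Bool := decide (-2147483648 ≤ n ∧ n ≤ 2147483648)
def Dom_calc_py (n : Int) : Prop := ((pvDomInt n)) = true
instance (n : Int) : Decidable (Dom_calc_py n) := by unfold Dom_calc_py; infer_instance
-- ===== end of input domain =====

-- B replaces A's iterative square-and-multiply loop by a recursive halving helper
-- computing 2^n mod 1e9+7; alternative decomposition, same cost.

-- ===== PORT A =====
-- while-loop of A as structural recursion on the shrinking n
def calcLoop (res bs n : Int) : Int :=
  if h : n > 0 then
    calcLoop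
      (if PySem.Int.mod n 2 = 1 then PySem.Int.mod (res * bs) 1000000007 else res)
      (PySem.Int.mod (bs * bs) 1000000007)
      (PySem.Int.floordiv n 2)
  else res
termination_by n.toNat
decreasing_by
  rw [PySem.Int.floordiv_eq_ediv_of_pos (by omega)]
  omega

def calc_py (n : Int) : Int := PySem.Int.mod (calcLoop 1 2 n - 1) 1000000007

-- ===== PORT B =====
-- helper _pow2 of Source B: 2^n mod 1e9+7 by recursive halving
def pow2mod (n : Int) : Int :=
  if h : n ≤ 0 then 1
  else
    let h1 := pow2mod (PySem.Int.floordiv n 2)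
    let h2 := PySem.Int.mod (h1 * h1) 1000000007
    if PySem.Int.mod n 2 = 1 then PySem.Int.mod (h2 * 2) 1000000007 else h2
termination_by n.toNat
decreasing_by
  rw [PySem.Int.floordiv_eq_ediv_of_pos (by omega)]
  omega

def calc_py_alt (n : Int) : Int := PySem.Int.mod (pow2mod n - 1) 1000000007

-- ===== PRECONDITION & SPEC =====
def Spec_calc_py (n : Int) (out : Int) : Prop := out = calc_py_alt n
instance (n : Int) (out : Int) : Decidable (Spec_calc_py n out) := by unfold Spec_calc_py; infer_instance

-- ===== CLAIM (what is proved, stated in full; the proofs are below) =====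
def Claim_equal_calc_py : Prop := ∀ (n : Int), Dom_calc_py n → Spec_calc_py n (calc_py n)

-- ===== LEMMAS AND PROOFS =====

theorem calcLoop_emod (res bs n : Int) :
    calcLoop res bs n % 1000000007 = (res * bs ^ n.toNat) % 1000000007 := by
  induction res, bs, n using calcLoop.induct with
  | case1 res bs n hn ih =>
    rw [calcLoop, dif_pos hn]
    rw [PySem.Int.floordiv_eq_ediv_of_pos (by omega)] at ih ⊢
    simp only [dite_eq_ite] at ih
    rw [PySem.Int.mod_eq_emod_of_pos (b := 2) (by omega)] at ih ⊢
    rw [ih]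
    have base : ∀ a : Int, (a % 1000000007) ≡ a [ZMOD 1000000007] :=
      fun a => Int.emod_emod_of_dvd a dvd_rfl
    by_cases hr : n % 2 = 1
    · have hk : n.toNat = 2 * ((n/2).toNat) + 1 := by omega
      rw [if_pos hr, hk]
      rw [PySem.Int.mod_eq_emod_of_pos (by norm_num), PySem.Int.mod_eq_emod_of_pos (by norm_num)]
      have hc : ((res*bs) % 1000000007) * (((bs*bs) % 1000000007))^((n/2).toNat)
          ≡ (res*bs) * (bs*bs)^((n/2).toNat) [ZMOD 1000000007] :=
        (base _).mul ((base _).pow _)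
      rw [hc]
      congr 1
      ring
    · have hr0 : n % 2 = 0 := by omega
      have hk : n.toNat = 2 * ((n/2).toNat) := by omega
      rw [if_neg hr, hk]
      rw [PySem.Int.mod_eq_emod_of_pos (by norm_num)]
      have hc : res * (((bs*bs) % 1000000007))^((n/2).toNat)
          ≡ res * (bs*bs)^((n/2).toNat) [ZMOD 1000000007] :=
        (Int.ModEq.refl _).mul ((base _).pow _)
      rw [hc]
      congr 1
      ring
  | case2 res bs n hn =>
    rw [calcLoop, dif_neg hn]
    have : n.toNat = 0 := by omega
    rw [this, pow_zero, mul_one]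

theorem pow2mod_emod (n : Int) :
    pow2mod n % 1000000007 = (2 ^ n.toNat) % 1000000007 := by
  have base : ∀ a : Int, (a % 1000000007) % 1000000007 = a % 1000000007 :=
    fun a => Int.emod_emod_of_dvd a dvd_rfl
  induction n using pow2mod.induct with
  | case1 n hn =>
    rw [pow2mod, dif_pos hn]
    have : n.toNat = 0 := by omega
    rw [this, pow_zero]
  | case2 n hn hodd ih =>
    have hn' : 0 < n := by omega
    have hodd' : n % 2 = 1 := by
      rw [← PySem.Int.mod_eq_emod_of_pos (b := 2) (by omega)]; exact hodd
    rw [PySem.Int.floordiv_eq_ediv_of_pos (by omega)] at ih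
    rw [pow2mod, dif_neg hn]
    simp only [if_pos hodd]
    rw [PySem.Int.floordiv_eq_ediv_of_pos (by omega)]
    rw [PySem.Int.mod_eq_emod_of_pos (by norm_num), PySem.Int.mod_eq_emod_of_pos (by norm_num)]
    have hk : n.toNat = 2 * ((n/2).toNat) + 1 := by omega
    rw [base, Int.mul_emod, base, Int.mul_emod (pow2mod (n/2)), ih,
      ← Int.mul_emod (2 ^ (n/2).toNat), ← Int.mul_emod, hk]
    congr 1
    ring
  | case3 n hn hodd ih =>
    have hn' : 0 < n := by omega
    have hodd' : ¬ n % 2 = 1 := by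
      rw [← PySem.Int.mod_eq_emod_of_pos (b := 2) (by omega)]; exact hodd
    rw [PySem.Int.floordiv_eq_ediv_of_pos (by omega)] at ih
    rw [pow2mod, dif_neg hn]
    simp only [if_neg hodd]
    rw [PySem.Int.floordiv_eq_ediv_of_pos (by omega)]
    rw [PySem.Int.mod_eq_emod_of_pos (by norm_num)]
    have hk : n.toNat = 2 * ((n/2).toNat) := by omega
    rw [base, Int.mul_emod, ih, ← Int.mul_emod, hk]
    congr 1
    ring

-- ===== VERDICT (by name: the statement is the Claim_ definition above) =====
theorem calc_py_spec : Claim_equal_calc_py := by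
  intro n _
  unfold Spec_calc_py calc_py calc_py_alt
  rw [PySem.Int.mod_eq_emod_of_pos (by norm_num), PySem.Int.mod_eq_emod_of_pos (by norm_num)]
  rw [Int.sub_emod (calcLoop 1 2 n), Int.sub_emod (pow2mod n)]
  rw [calcLoop_emod, pow2mod_emod, one_mul]
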